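-- pv_equiv track=rewrite | github.com/heewon0107/Algorithm | 프로그래머스/2/12899. 124 나라의 숫자/124 나라의 숫자.py | solution
-- ===== SOURCE A (Python) =====
-- def solution(n):
--     answer = ''
--     while n:
--         r = n % 3
--         n //= 3
--
--         if r == 0:
--             answer = '4' + answer
--             n -= 1
--         elif r == 1:
--             answer = '1' + answer
--         else:
--             answer = '2' + answer
--
--     return answer
-- ===== SOURCE B (Python) =====
-- def solution(n):
--     if n <= 0:
--         return ''
--     return solution((n - 1) // 3) + '124'[(n - 1) % 3]
-- ===== Notes on version B (the rewrite author's own statement) =====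
-- stated objective: simpler
-- what changed: Replaces the imperative while loop that prepends to an accumulator (with the r==0 carry branch) by direct recursion on the reduced quotient (n-1)//3, folding the three-way branch into a '124' digit lookup.
import Mathlib
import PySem

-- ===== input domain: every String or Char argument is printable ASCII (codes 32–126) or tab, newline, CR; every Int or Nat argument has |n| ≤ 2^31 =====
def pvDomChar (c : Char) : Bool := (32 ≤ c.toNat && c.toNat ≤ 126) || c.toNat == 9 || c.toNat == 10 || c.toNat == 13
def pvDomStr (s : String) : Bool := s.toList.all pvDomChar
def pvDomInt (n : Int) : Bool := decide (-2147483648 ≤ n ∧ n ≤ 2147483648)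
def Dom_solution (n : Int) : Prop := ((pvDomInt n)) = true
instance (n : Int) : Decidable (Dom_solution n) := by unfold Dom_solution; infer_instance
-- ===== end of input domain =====

-- B replaces A's imperative prepend loop by recursion on (n-1)//3 with a '124' digit lookup (objective: simpler).

-- ===== PORT A =====
-- while loop of A, fuel-bounded for totality only (fuel = n.toNat suffices since n strictly decreases while positive)
def solutionLoop : Nat → Int → String → String
  | 0, _, answer => answer
  | fuel + 1, n, answer =>
    if n = 0 then answer
    else
      let r := PySem.Int.mod n 3
      let n' := PySem.Int.floordiv n 3
      if r = 0 then solutionLoop fuel (n' - 1) ("4" ++ answer)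
      else if r = 1 then solutionLoop fuel n' ("1" ++ answer)
      else solutionLoop fuel n' ("2" ++ answer)

def solution (n : Int) : String := solutionLoop n.toNat n ""

-- ===== PORT B =====
-- '124'[i]  (i always in range here; "" is the out-of-range totality default)
def digit124 (i : Int) : String :=
  match PySem.Str.pyGet? "124" i with
  | some c => String.singleton c
  | none => ""

def solution_alt (n : Int) : String :=
  if _h : n ≤ 0 then ""
  else solution_alt (PySem.Int.floordiv (n - 1) 3) ++ digit124 (PySem.Int.mod (n - 1) 3)
termination_by n.toNat
decreasing_by
  have h3 : PySem.Int.floordiv (n - 1) 3 = (n - 1) / 3 :=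
    PySem.Int.floordiv_eq_ediv_of_pos (by omega)
  omega

-- ===== PRECONDITION & SPEC =====
-- Pre_ excludes n < 0, on which A's while loop never terminates (n //= 3 stays at -1).
def Pre_solution (n : Int) : Prop := 0 ≤ n
instance (n : Int) : Decidable (Pre_solution n) := by unfold Pre_solution; infer_instance
def pvWitness_solution : Int := 11
def Spec_solution (n : Int) (out : String) : Prop := out = solution_alt n
instance (n : Int) (out : String) : Decidable (Spec_solution n out) := by unfold Spec_solution; infer_instance

-- ===== CLAIM (what is proved, stated in full; the proofs are below) =====
def Claim_equal_solution : Prop := ∀ (n : Int), Dom_solution n → Pre_solution n → Spec_solution n (solution n)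

-- ===== LEMMAS AND PROOFS =====

theorem solution_alt_pos (n : Int) (h : ¬ n ≤ 0) :
    solution_alt n =
      solution_alt (PySem.Int.floordiv (n - 1) 3) ++ digit124 (PySem.Int.mod (n - 1) 3) := by
  rw [solution_alt]; simp [h]

theorem loop_inv (fuel : Nat) (n : Int) (acc : String)
    (h0 : 0 ≤ n) (hf : n.toNat ≤ fuel) :
    solutionLoop fuel n acc = solution_alt n ++ acc := by
  induction fuel generalizing n acc with
  | zero =>
    have : n = 0 := by omega
    subst this
    simp [solutionLoop, solution_alt]
  | succ fuel ih =>
    by_cases hz : n = 0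
    · subst hz; simp [solutionLoop, solution_alt]
    · have hpos : 0 < n := by omega
      have hmod : PySem.Int.mod n 3 = n % 3 := PySem.Int.mod_eq_emod_of_pos (by omega)
      have hdiv : PySem.Int.floordiv n 3 = n / 3 := PySem.Int.floordiv_eq_ediv_of_pos (by omega)
      have hmod' : PySem.Int.mod (n - 1) 3 = (n - 1) % 3 := PySem.Int.mod_eq_emod_of_pos (by omega)
      have hdiv' : PySem.Int.floordiv (n - 1) 3 = (n - 1) / 3 := PySem.Int.floordiv_eq_ediv_of_pos (by omega)
      have halt := solution_alt_pos n (by omega)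
      rw [solutionLoop]
      simp only [hz, if_false, hmod, hdiv]
      have h3 : n % 3 = 0 ∨ n % 3 = 1 ∨ n % 3 = 2 := by omega
      rcases h3 with h3 | h3 | h3
      · -- r = 0 : next n is n/3 - 1 = (n-1)/3, digit '4'
        have hnext : n / 3 - 1 = (n - 1) / 3 := by omega
        have hm1 : (n - 1) % 3 = 2 := by omega
        simp only [h3]
        rw [ih _ _ (by omega) (by omega), halt, hdiv', ← hnext, hmod', hm1]
        simp [digit124, PySem.Str.pyGet?, String.singleton, String.append_assoc]
      · have hnext : n / 3 = (n - 1) / 3 := by omega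
        have hm1 : (n - 1) % 3 = 0 := by omega
        simp only [h3]
        rw [if_neg (by omega), ih _ _ (by omega) (by omega), halt, hdiv', ← hnext, hmod', hm1]
        simp [digit124, PySem.Str.pyGet?, String.singleton, String.append_assoc]
      · have hnext : n / 3 = (n - 1) / 3 := by omega
        have hm1 : (n - 1) % 3 = 1 := by omega
        rw [if_neg (by omega), if_neg (by omega), ih _ _ (by omega) (by omega),
          halt, hdiv', ← hnext, hmod', hm1]
        simp [digit124, PySem.Str.pyGet?, String.singleton, String.append_assoc]

-- ===== VERDICT (by name: the statement is the Claim_ definition above) =====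
theorem solution_spec : Claim_equal_solution := by
  intro n _ hpre
  unfold Spec_solution solution
  rw [loop_inv n.toNat n "" hpre (le_refl _)]
  simp
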